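-- pv_equiv track=rewrite | github.com/official-techsupport/aoc | advent_of_code_utils.py | pad_map_with_border
-- ===== SOURCE A (Python) =====
-- def pad_map_with_border(mm, sentinel=None):
--     '''Pad a rectangular map with a border made of `None`s or provided sentinel values'''
--     width = len(mm[0])
--     assert all(width == len(row) for row in mm)
--     res = []
--     res.append([sentinel for _ in range(width + 2)])
--     for row in mm:
--         rr = [sentinel]
--         rr.extend(row)
--         rr.append(sentinel)
--         res.append(rr)
--     res.append([sentinel for _ in range(width + 2)])
--     return res
-- ===== SOURCE B (Python) =====
-- def pad_map_with_border(mm, sentinel=None):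
--     '''Pad a rectangular map with a border made of `None`s or provided sentinel values'''
--     width = len(mm[0])
--     assert all(width == len(row) for row in mm)
--     height = len(mm)
--     return [[mm[i - 1][j - 1] if 1 <= i <= height and 1 <= j <= width else sentinel
--              for j in range(width + 2)]
--             for i in range(height + 2)]
-- ===== Notes on version B (the rewrite author's own statement) =====
-- stated objective: simpler
-- what changed: Replaces the incremental append/extend row-building loop with a single closed-form nested comprehension that computes each cell from its (i,j) index, writing sentinel on the border and mm[i-1][j-1] inside.
import Mathlib
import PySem

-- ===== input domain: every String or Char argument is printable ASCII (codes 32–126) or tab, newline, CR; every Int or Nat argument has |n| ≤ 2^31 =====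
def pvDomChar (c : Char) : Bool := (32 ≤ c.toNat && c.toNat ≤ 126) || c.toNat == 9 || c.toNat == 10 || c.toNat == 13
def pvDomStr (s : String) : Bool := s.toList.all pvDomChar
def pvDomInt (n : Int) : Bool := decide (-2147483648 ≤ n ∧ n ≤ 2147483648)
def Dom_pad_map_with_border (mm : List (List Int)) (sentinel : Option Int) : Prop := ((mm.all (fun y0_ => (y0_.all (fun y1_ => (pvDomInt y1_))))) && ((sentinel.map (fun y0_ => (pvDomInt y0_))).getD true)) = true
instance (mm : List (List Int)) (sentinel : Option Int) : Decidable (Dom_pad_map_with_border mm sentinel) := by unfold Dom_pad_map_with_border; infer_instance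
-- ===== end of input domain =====

-- B builds the padded map as one closed-form nested comprehension indexed by (i, j)
-- instead of A's incremental append/extend row-building loop (objective: simpler).

-- ===== PORT A =====
-- width = len(mm[0]); assert; res = [border]; for row: res.append([s]+row+[s]); res.append(border)
def pad_map_with_border (mm : List (List Int)) (sentinel : Option Int) : List (List (Option Int)) :=
  let width := (mm.headD []).length
  let res : List (List (Option Int)) := [(List.range (width + 2)).map (fun _ => sentinel)]
  let res := mm.foldl (fun res row => res ++ [[sentinel] ++ row.map some ++ [sentinel]]) res
  res ++ [(List.range (width + 2)).map (fun _ => sentinel)]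

-- ===== PORT B =====
-- one nested comprehension over i in range(height+2), j in range(width+2);
-- mm[i-1][j-1] is always in range when the guard holds, so getD is exact there
def pad_map_with_border_alt (mm : List (List Int)) (sentinel : Option Int) : List (List (Option Int)) :=
  let width := (mm.headD []).length
  let height := mm.length
  (List.range (height + 2)).map (fun i =>
    (List.range (width + 2)).map (fun j =>
      if 1 ≤ i ∧ i ≤ height ∧ 1 ≤ j ∧ j ≤ width
      then some ((mm.getD (i - 1) []).getD (j - 1) 0)
      else sentinel))

-- ===== PRECONDITION & SPEC =====
-- Pre_ excludes exactly the inputs on which A raises: empty mm (IndexError on mm[0])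
-- and ragged rows (AssertionError); B raises identically there.
def Pre_pad_map_with_border (mm : List (List Int)) (sentinel : Option Int) : Prop :=
  mm ≠ [] ∧ ∀ row ∈ mm, row.length = (mm.headD []).length
instance (mm : List (List Int)) (sentinel : Option Int) : Decidable (Pre_pad_map_with_border mm sentinel) := by unfold Pre_pad_map_with_border; infer_instance

def pvWitness_pad_map_with_border : List (List Int) × Option Int := ([[1, 2], [3, 4]], some 9)

def Spec_pad_map_with_border (mm : List (List Int)) (sentinel : Option Int) (out : List (List (Option Int))) : Prop := out = pad_map_with_border_alt mm sentinel
instance (mm : List (List Int)) (sentinel : Option Int) (out : List (List (Option Int))) : Decidable (Spec_pad_map_with_border mm sentinel out) := by unfold Spec_pad_map_with_border; infer_instance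

-- ===== CLAIM (what is proved, stated in full; the proofs are below) =====
def Claim_equal_pad_map_with_border : Prop := ∀ (mm : List (List Int)) (sentinel : Option Int), Dom_pad_map_with_border mm sentinel → Pre_pad_map_with_border mm sentinel → Spec_pad_map_with_border mm sentinel (pad_map_with_border mm sentinel)

-- ===== LEMMAS AND PROOFS =====

-- mapping G over getD-indexed range recovers map G
theorem pv_map_range_getD {α β : Type} (l : List α) (d : α) (G : α → β) :
    (List.range l.length).map (fun i => G (l.getD i d)) = l.map G := by
  induction l with
  | nil => simp
  | cons a t ih =>
    rw [List.length_cons, List.range_succ_eq_map, List.map_cons, List.map_map, List.map_cons]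
    refine congrArg₂ _ (by simp) ?_
    simpa [Function.comp_def] using ih

theorem pv_foldl_append_map {α β : Type} (l : List α) (f : α → β) :
    ∀ (init : List β), l.foldl (fun r x => r ++ [f x]) init = init ++ l.map f := by
  induction l with
  | nil => simp
  | cons a t ih => intro init; simp [ih]

theorem pad_map_with_border_spec : Claim_equal_pad_map_with_border := by
  intro mm sentinel _ hpre
  obtain ⟨hne, hlen⟩ := hpre
  unfold Spec_pad_map_with_border pad_map_with_border pad_map_with_border_alt
  simp only [pv_foldl_append_map]
  symm
  rw [show List.range (mm.length + 2)
        = 0 :: (List.range mm.length).map Nat.succ ++ [mm.length + 1] by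
      rw [List.range_succ, List.range_succ_eq_map]]
  simp only [List.map_append, List.map_cons, List.map_map, List.map_nil,
    List.cons_append, List.nil_append]
  refine congrArg₂ List.cons ?_ (congrArg₂ (· ++ ·) ?_ ?_)
  · -- top border row
    apply List.map_congr_left
    intro j _
    simp
  · -- interior rows
    trans (List.range mm.length).map
        (fun i => sentinel :: ((mm.getD i []).map some ++ [sentinel]))
    · apply List.map_congr_left
      intro i hi
      rw [List.mem_range] at hi
      have hrowmem : mm.getD i [] ∈ mm := by
        rw [List.getD_eq_getElem mm [] (by omega)]
        exact List.getElem_mem _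
      have hrw : (mm.getD i []).length = (mm.headD []).length := hlen _ hrowmem
      simp only [Function.comp_def]
      rw [show List.range ((mm.headD []).length + 2)
            = 0 :: (List.range (mm.headD []).length).map Nat.succ
                ++ [(mm.headD []).length + 1] by
          rw [List.range_succ, List.range_succ_eq_map]]
      simp only [List.map_append, List.map_cons, List.map_map, List.map_nil,
        List.cons_append, List.nil_append]
      refine congrArg₂ List.cons ?_ (congrArg₂ (· ++ ·) ?_ ?_)
      · simp
      · trans (List.range (mm.headD []).length).map
            (fun j => some ((mm.getD i []).getD j 0))
        · apply List.map_congr_left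
          intro j hj
          rw [List.mem_range] at hj
          simp only [Function.comp_def]
          have hc : 1 ≤ Nat.succ i ∧ Nat.succ i ≤ mm.length ∧
              1 ≤ Nat.succ j ∧ Nat.succ j ≤ (mm.headD []).length := by omega
          rw [if_pos hc]
          simp
        · rw [← hrw]
          exact pv_map_range_getD (mm.getD i []) 0 (fun x => some x)
      · -- right border cell
        have hc : ¬ (1 ≤ Nat.succ i ∧ Nat.succ i ≤ mm.length ∧
            1 ≤ (mm.headD []).length + 1 ∧
            (mm.headD []).length + 1 ≤ (mm.headD []).length) := by omega
        rw [if_neg hc]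
    · exact pv_map_range_getD mm []
        (fun row => sentinel :: (row.map some ++ [sentinel]))
  · -- bottom border row
    refine congrArg (fun r => [r]) ?_
    apply List.map_congr_left
    intro j _
    have hc : ¬ (1 ≤ mm.length + 1 ∧ mm.length + 1 ≤ mm.length ∧
        1 ≤ j ∧ j ≤ (mm.headD []).length) := by omega
    rw [if_neg hc]

-- ===== VERDICT (by name: the statement is the Claim_ definition above) =====
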